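-- pv_equiv track=rewrite | github.com/nickhealthy/python-algorithm | 프로그래머스/DFS,BFS/[LV2]-판데믹.py | solution
-- ===== SOURCE A (Python) =====
-- from collections import deque
--
-- dx = [-1, 1, 0, 0]
--
-- dy = [0, 0, -1, 1]
--
-- def solution(rows, columns, max_virus, queries):
--     answer = [[0] * columns for _ in range(rows)]
--
--     q = deque(queries)
--     while q:
--         x, y = q.popleft()
--         x -= 1
--         y -= 1
--
--         # 세균이 max_virus 미만인 경우
--         if answer[x][y] < max_virus:
--             answer[x][y] += 1
--
--         # 세균이 max_virus인 경우
--         elif answer[x][y] == max_virus: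
--             # 주변에 세균 증식이 가능한 정보를 담는 배열
--             virus_proliferate_arr = deque([(x, y)])
--             # 중복 방문을 피하기 위한 체크 배열
--             visited = [[0] * columns for _ in range(rows)]
--             while virus_proliferate_arr:
--                 vx, vy = virus_proliferate_arr.popleft()
--
--                 for i in range(4):
--                     nx = dx[i] + vx
--                     ny = dy[i] + vy
--
--                     # 가능한 경로인지 체크
--                     if 0 <= nx < rows and 0 <= ny < columns:
--                         # 각 칸의 virus 수 확인 및 증식
--                         if visited[nx][ny] == 0 and answer[nx][ny] < max_virus:
--                             visited[nx][ny] = 1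
--                             answer[nx][ny] += 1
--
--                         elif visited[nx][ny] == 0 and answer[nx][ny] == max_virus:
--                             visited[nx][ny] = 1
--                             virus_proliferate_arr.append((nx, ny))
--
--     return answer
-- ===== SOURCE B (Python) =====
-- def solution(rows, columns, max_virus, queries):
--     # Two-stage, worklist-free reformulation: for a saturated query cell, the
--     # 4-connected component of cells holding max_virus is computed by repeated
--     # whole-grid label-propagation sweeps into a coordinate set (no queue or
--     # stack), then the grid is rebuilt in one comprehension, incrementing
--     # every sub-threshold cell adjacent to the component.
--     answer = [[0] * columns for _ in range(rows)]
--     for qx, qy in queries: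
--         x = qx - 1
--         y = qy - 1
--         if answer[x][y] < max_virus:
--             answer[x][y] += 1
--         elif answer[x][y] == max_virus:
--             region = {(x, y)}
--             changed = True
--             while changed:
--                 changed = False
--                 for i in range(rows):
--                     for j in range(columns):
--                         if ((i, j) not in region and answer[i][j] == max_virus
--                                 and _adjacent(region, i, j)):
--                             region.add((i, j))
--                             changed = True
--             answer = [
--                 [v + 1 if v < max_virus and _adjacent(region, i, j) else v
--                  for j, v in enumerate(row)]
--                 for i, row in enumerate(answer)
--             ]
--     return answer
--
--
-- def _adjacent(region, i, j):
--     return any((i + di, j + dj) in region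
--                for di, dj in ((-1, 0), (1, 0), (0, -1), (0, 1)))
-- ===== Notes on version B (the rewrite author's own statement) =====
-- stated objective: alternative
-- what changed: The per-cell deque BFS with a visited grid is replaced by a worklist-free two-stage computation: a fixed-point label-propagation sweep over the whole grid collects the saturated connected component into a coordinate set, and then one comprehension rebuilds the grid, incrementing every sub-threshold cell adjacent to that set.
import Mathlib
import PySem

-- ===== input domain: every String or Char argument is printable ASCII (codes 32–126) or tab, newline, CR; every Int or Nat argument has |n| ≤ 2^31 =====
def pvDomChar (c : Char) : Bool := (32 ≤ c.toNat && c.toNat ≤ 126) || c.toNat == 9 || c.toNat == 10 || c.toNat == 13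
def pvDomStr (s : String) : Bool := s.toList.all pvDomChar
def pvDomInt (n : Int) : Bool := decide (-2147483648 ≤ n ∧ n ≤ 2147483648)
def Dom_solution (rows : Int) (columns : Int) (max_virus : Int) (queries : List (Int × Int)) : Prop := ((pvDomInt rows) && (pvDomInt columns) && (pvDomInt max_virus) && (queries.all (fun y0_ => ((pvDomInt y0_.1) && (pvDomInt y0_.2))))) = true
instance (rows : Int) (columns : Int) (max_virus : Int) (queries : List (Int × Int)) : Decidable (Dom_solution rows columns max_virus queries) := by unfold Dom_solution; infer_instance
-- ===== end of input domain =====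

-- B replaces A's per-cell deque BFS (with a visited grid) by a worklist-free two-stage
-- computation: a fixed-point label-propagation sweep over the whole grid collects the
-- saturated connected component into a coordinate set, then one comprehension rebuilds
-- the grid, incrementing every sub-threshold cell adjacent to that set.
-- Return-value equivalence on Pre_ (where A returns).

-- ---- shared grid primitives (Python list-of-lists indexing/assignment, wrap semantics) ----

/-- `g[i][j]` (Python indexing, negative wrap); `none` = IndexError. -/
def pvGGet? {α : Type} (g : List (List α)) (i j : Int) : Option α :=
  (PySem.List.pyGet? g i).bind (fun r => PySem.List.pyGet? r j)

/-- `g[i][j] = v` (Python assignment; no-op where Python would raise — such inputs are outside Pre_). -/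
def pvGSet {α : Type} (g : List (List α)) (i j : Int) (v : α) : List (List α) :=
  ((PySem.List.pyGet? g i).map (fun r => PySem.List.pySetD g i (PySem.List.pySetD r j v))).getD g

/-- number of grid entries equal to `t` (termination measure for A's flood fill). -/
def pvCnt {α : Type} [BEq α] (t : α) (g : List (List α)) : Nat := (g.map (fun r => r.count t)).sum

-- termination support (cited by the ports' `decreasing_by`)
theorem pv_sum_set_lt (l : List Nat) : ∀ (k : Nat) (a b : Nat), l[k]? = some a → b < a → (l.set k b).sum < l.sum := by
  induction l with
  | nil => intro k a b h; simp at h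
  | cons x xs ih =>
    intro k a b h hba
    cases k with
    | zero =>
      simp only [List.getElem?_cons_zero, Option.some_inj] at h
      subst h
      simp only [List.set, List.sum_cons]
      omega
    | succ k =>
      simp only [List.getElem?_cons_succ] at h
      have := ih k a b h hba
      simp [List.set]; omega

theorem pv_count_set_lt {α : Type} [BEq α] [LawfulBEq α] (r : List α) :
    ∀ (j : Nat) (x y : α), r[j]? = some x → y ≠ x → (r.set j y).count x < r.count x := by
  induction r with
  | nil => intro j x y h; simp at h
  | cons z zs ih =>
    intro j x y h hyx
    cases j with
    | zero =>
      simp only [List.getElem?_cons_zero, Option.some_inj] at h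
      subst h
      have h1 : (y == z) = false := by simp [hyx]
      simp [List.set, List.count_cons, h1]
    | succ j =>
      simp only [List.getElem?_cons_succ] at h
      have := ih j x y h hyx
      simp only [List.set, List.count_cons]
      omega

theorem pvCnt_gSet_lt {α : Type} [BEq α] [LawfulBEq α] (g : List (List α)) (i j : Int) (x y : α)
    (hg : pvGGet? g i j = some x) (hi : 0 ≤ i) (hj : 0 ≤ j) (hyx : y ≠ x) :
    pvCnt x (pvGSet g i j y) < pvCnt x g := by
  unfold pvGGet? at hg
  unfold pvGSet
  cases hrow : PySem.List.pyGet? g i with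
  | none => simp [hrow] at hg
  | some r =>
    simp only [hrow, Option.bind_some, Option.map_some, Option.getD_some] at hg ⊢
    rw [PySem.List.pyGet?_of_nonneg _ hi] at hrow
    rw [PySem.List.pySetD_of_nonneg _ _ hi, PySem.List.pySetD_of_nonneg _ _ hj]
    rw [PySem.List.pyGet?_of_nonneg _ hj] at hg
    unfold pvCnt
    rw [List.map_set]
    apply pv_sum_set_lt _ i.toNat (r.count x) _
    · rw [List.getElem?_map, hrow]; rfl
    · exact pv_count_set_lt r j.toNat x y hg hyx

-- ===== PORT A =====  (literal transliteration of the Python: deque BFS flood fill)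

def dxA : List Int := [-1, 1, 0, 0]
def dyA : List Int := [0, 0, -1, 1]

/-- body of A's inner `for i in range(4)` loop, for one direction `d = (dx[i], dy[i])`. -/
def visitA (rows columns max_virus vx vy : Int)
    (st : List (List Int) × List (List Int) × List (Int × Int)) (d : Int × Int) :
    List (List Int) × List (List Int) × List (Int × Int) :=
  if 0 ≤ d.1 + vx ∧ d.1 + vx < rows ∧ 0 ≤ d.2 + vy ∧ d.2 + vy < columns then
    match pvGGet? st.2.1 (d.1 + vx) (d.2 + vy), pvGGet? st.1 (d.1 + vx) (d.2 + vy) with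
    | some w, some a =>
      if w = 0 ∧ a < max_virus then
        (pvGSet st.1 (d.1 + vx) (d.2 + vy) (a + 1), pvGSet st.2.1 (d.1 + vx) (d.2 + vy) 1, st.2.2)
      else if w = 0 ∧ a = max_virus then
        (st.1, pvGSet st.2.1 (d.1 + vx) (d.2 + vy) 1, st.2.2 ++ [(d.1 + vx, d.2 + vy)])
      else st
    | _, _ => st   -- unreachable on a rows×columns grid (read-guard only makes the port total)
  else st

/-- A's processing of one dequeued cell: the `for i in range(4)` loop. -/
def stepA (rows columns max_virus : Int) (v : Int × Int) (ans vis : List (List Int)) :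
    List (List Int) × List (List Int) × List (Int × Int) :=
  (dxA.zip dyA).foldl (visitA rows columns max_virus v.1 v.2) (ans, vis, [])

theorem visitA_measure (rows columns max_virus vx vy : Int) (st : List (List Int) × List (List Int) × List (Int × Int)) (d : Int × Int) :
    visitA rows columns max_virus vx vy st d = st ∨
      pvCnt 0 (visitA rows columns max_virus vx vy st d).2.1 < pvCnt 0 st.2.1 := by
  unfold visitA
  split
  · cases hw : pvGGet? st.2.1 (d.1 + vx) (d.2 + vy) with
    | none => cases pvGGet? st.1 (d.1 + vx) (d.2 + vy) <;> simp
    | some w =>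
      cases ha : pvGGet? st.1 (d.1 + vx) (d.2 + vy) with
      | none => simp
      | some a =>
        simp only []
        split
        · rename_i hcond
          right
          exact pvCnt_gSet_lt _ _ _ _ _ (hcond.1 ▸ hw) (by omega) (by omega) (by norm_num)
        · split
          · rename_i _ hcond
            right
            exact pvCnt_gSet_lt _ _ _ _ _ (hcond.1 ▸ hw) (by omega) (by omega) (by norm_num)
          · left; rfl
  · left; rfl

theorem foldA_measure (rows columns max_virus vx vy : Int) :
    ∀ (ds : List (Int × Int)) (st : List (List Int) × List (List Int) × List (Int × Int)),
      ds.foldl (visitA rows columns max_virus vx vy) st = st ∨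
        pvCnt 0 (ds.foldl (visitA rows columns max_virus vx vy) st).2.1 < pvCnt 0 st.2.1 := by
  intro ds
  induction ds with
  | nil => intro st; left; rfl
  | cons d ds ih =>
    intro st
    simp only [List.foldl_cons]
    rcases visitA_measure rows columns max_virus vx vy st d with h | h
    · rw [h]; exact ih st
    · rcases ih (visitA rows columns max_virus vx vy st d) with h2 | h2
      · rw [h2]; right; exact h
      · right; omega

theorem stepA_measure (rows columns max_virus : Int) (v : Int × Int) (ans vis : List (List Int)) :
    ((stepA rows columns max_virus v ans vis).2.1 = vis ∧ (stepA rows columns max_virus v ans vis).2.2 = ([] : List (Int × Int))) ∨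
      pvCnt 0 (stepA rows columns max_virus v ans vis).2.1 < pvCnt 0 vis := by
  unfold stepA
  rcases foldA_measure rows columns max_virus v.1 v.2 (dxA.zip dyA) (ans, vis, []) with h | h
  · left; rw [h]; exact ⟨rfl, rfl⟩
  · right; exact h

/-- A's inner `while virus_proliferate_arr:` BFS loop. -/
def bfsA (rows columns max_virus : Int) (ans vis : List (List Int)) (q : List (Int × Int)) :
    List (List Int) :=
  match q with
  | [] => ans
  | v :: rest =>
    bfsA rows columns max_virus
      (stepA rows columns max_virus v ans vis).1
      (stepA rows columns max_virus v ans vis).2.1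
      (rest ++ (stepA rows columns max_virus v ans vis).2.2)
termination_by (pvCnt 0 vis, q.length)
decreasing_by
  rcases stepA_measure rows columns max_virus v ans vis with ⟨h1, h2⟩ | h
  · rw [h1, h2]
    exact Prod.Lex.right _ (by simp)
  · exact Prod.Lex.left _ _ h

/-- A's outer `while q:` loop over the queries deque. -/
def solGoA (rows columns max_virus : Int) (answer : List (List Int)) :
    List (Int × Int) → List (List Int)
  | [] => answer
  | (qx, qy) :: rest =>
    match pvGGet? answer (qx - 1) (qy - 1) with
    | none => solGoA rows columns max_virus answer rest   -- Python raises IndexError here (outside Pre_)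
    | some a =>
      if a < max_virus then
        solGoA rows columns max_virus (pvGSet answer (qx - 1) (qy - 1) (a + 1)) rest
      else if a = max_virus then
        solGoA rows columns max_virus
          (bfsA rows columns max_virus answer
            (List.replicate rows.toNat (List.replicate columns.toNat (0 : Int)))
            [(qx - 1, qy - 1)]) rest
      else solGoA rows columns max_virus answer rest

def solution (rows : Int) (columns : Int) (max_virus : Int) (queries : List (Int × Int)) : List (List Int) :=
  solGoA rows columns max_virus
    (List.replicate rows.toNat (List.replicate columns.toNat (0 : Int))) queries

-- ===== PORT B =====  (literal transliteration of Source B: fixed-point sweeps into a coordinate set)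

/-- Source B's `_adjacent(region, i, j)`: `any((i+di, j+dj) in region for di, dj in dirs)`. -/
def pvAdj (region : List (Int × Int)) (i j : Int) : Bool :=
  ([((-1 : Int), (0 : Int)), (1, 0), (0, -1), (0, 1)]).any
    (fun d => region.contains (i + d.1, j + d.2))

/-- the index pairs visited by `for i in range(rows): for j in range(columns):`. -/
def pvCells (rows columns : Int) : List (Int × Int) :=
  (PySem.List.pyRange 0 rows 1).flatMap (fun i =>
    (PySem.List.pyRange 0 columns 1).map (fun j => (i, j)))

/-- body of one cell of Source B's sweep: mark `(i, j)` and set `changed` when it is an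
    unmarked saturated cell adjacent to the region. -/
def sweepCell (max_virus : Int) (answer : List (List Int))
    (st : List (Int × Int) × Bool) (c : Int × Int) : List (Int × Int) × Bool :=
  if c ∉ st.1 ∧ pvGGet? answer c.1 c.2 = some max_virus ∧ pvAdj st.1 c.1 c.2 = true then
    (PySem.Set.add st.1 c, true)
  else st

/-- one full `for i … for j …` sweep, starting from `changed = False`. -/
def sweepOnce (rows columns max_virus : Int) (answer : List (List Int))
    (region : List (Int × Int)) : List (Int × Int) × Bool :=
  (pvCells rows columns).foldl (sweepCell max_virus answer) (region, false)

/-- measure for the `while changed:` loop: unmarked grid cells. -/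
def pvMu (rows columns : Int) (region : List (Int × Int)) : Nat :=
  ((pvCells rows columns).filter (fun c => decide (c ∉ region))).length

theorem pvMu_filter_mono (l : List (Int × Int)) (r r' : List (Int × Int)) (h : ∀ x ∈ r, x ∈ r') :
    (l.filter (fun c => decide (c ∉ r'))).length ≤ (l.filter (fun c => decide (c ∉ r))).length := by
  rw [← List.countP_eq_length_filter, ← List.countP_eq_length_filter]
  apply List.countP_mono_left
  intro a _ ha
  simp only [decide_eq_true_eq] at *
  exact fun hm => ha (h a hm)

theorem pvMu_strict (rows columns : Int) (r r' : List (Int × Int)) (c : Int × Int)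
    (hsub : ∀ x ∈ r, x ∈ r') (hc : c ∈ pvCells rows columns) (hno : c ∉ r) (hyes : c ∈ r') :
    pvMu rows columns r' < pvMu rows columns r := by
  obtain ⟨l1, l2, hsplit⟩ := List.append_of_mem hc
  unfold pvMu
  rw [hsplit]
  have e1 : (decide (c ∉ r)) = true := by simpa using hno
  have e2 : (decide (c ∉ r')) = false := by simpa using hyes
  have h1 := pvMu_filter_mono l1 r r' hsub
  have h2 := pvMu_filter_mono l2 r r' hsub
  simp only [List.filter_append, List.filter_cons, e1, e2, Bool.false_eq_true, if_true, if_false,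
    List.length_append, List.length_cons]
  omega

theorem sweepCell_cases (max_virus : Int) (answer : List (List Int))
    (st : List (Int × Int) × Bool) (c : Int × Int) :
    sweepCell max_virus answer st c = st ∨
      (c ∉ st.1 ∧ sweepCell max_virus answer st c = (st.1 ++ [c], true)) := by
  unfold sweepCell
  split
  · rename_i h
    right
    refine ⟨h.1, ?_⟩
    unfold PySem.Set.add
    rw [if_neg (by simpa using h.1)]
  · left; rfl

theorem foldSweep_measure (rows columns max_virus : Int) (answer : List (List Int)) :
    ∀ (l : List (Int × Int)) (st : List (Int × Int) × Bool),
      (∀ c ∈ l, c ∈ pvCells rows columns) →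
      l.foldl (sweepCell max_virus answer) st = st ∨
        ((∀ x ∈ st.1, x ∈ (l.foldl (sweepCell max_virus answer) st).1) ∧
          pvMu rows columns (l.foldl (sweepCell max_virus answer) st).1 < pvMu rows columns st.1) := by
  intro l
  induction l with
  | nil => intro st _; left; rfl
  | cons c t ih =>
    intro st hmem
    simp only [List.foldl_cons]
    rcases sweepCell_cases max_virus answer st c with h | ⟨hno, h⟩
    · rw [h]
      exact ih st (fun x hx => hmem x (List.mem_cons_of_mem _ hx))
    · rw [h]
      right
      have hsub : ∀ x ∈ st.1, x ∈ st.1 ++ [c] := fun x hx => List.mem_append_left _ hx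
      have hstrict : pvMu rows columns (st.1 ++ [c]) < pvMu rows columns st.1 :=
        pvMu_strict rows columns st.1 (st.1 ++ [c]) c hsub
          (hmem c List.mem_cons_self) hno (List.mem_append_right _ List.mem_cons_self)
      rcases ih (st.1 ++ [c], true) (fun x hx => hmem x (List.mem_cons_of_mem _ hx)) with h2 | ⟨h2a, h2b⟩
      · rw [h2]
        exact ⟨hsub, hstrict⟩
      · have h2b' : pvMu rows columns (t.foldl (sweepCell max_virus answer) (st.1 ++ [c], true)).1 <
            pvMu rows columns (st.1 ++ [c]) := h2b
        have h2a' : ∀ x ∈ st.1 ++ [c], x ∈ (t.foldl (sweepCell max_virus answer) (st.1 ++ [c], true)).1 := h2a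
        refine ⟨fun x hx => h2a' x (hsub x hx), by omega⟩

theorem pvCells_self_mem (rows columns : Int) : ∀ c ∈ pvCells rows columns, c ∈ pvCells rows columns :=
  fun _ h => h

/-- Source B's `while changed:` fixed-point loop (sweep; repeat while something changed). -/
def sweepFix (rows columns max_virus : Int) (answer : List (List Int))
    (region : List (Int × Int)) : List (Int × Int) :=
  if (sweepOnce rows columns max_virus answer region).2 then
    sweepFix rows columns max_virus answer (sweepOnce rows columns max_virus answer region).1
  else (sweepOnce rows columns max_virus answer region).1
termination_by pvMu rows columns region
decreasing_by
  rcases foldSweep_measure rows columns max_virus answer (pvCells rows columns) (region, false)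
      (pvCells_self_mem rows columns) with h | ⟨_, h⟩
  · exfalso
    rename_i hch
    unfold sweepOnce at hch
    rw [h] at hch
    simp at hch
  · exact h

/-- Source B's rebuild comprehension: `[[v+1 if v < max_virus and _adjacent(region,i,j) else v …]]`. -/
def pvBumpGrid (max_virus : Int) (region : List (Int × Int)) (answer : List (List Int)) :
    List (List Int) :=
  answer.mapIdx (fun i row => row.mapIdx (fun j v =>
    if v < max_virus ∧ pvAdj region (i : Int) (j : Int) = true then v + 1 else v))

/-- B's `for qx, qy in queries:` loop. -/
def solGoB (rows columns max_virus : Int) (answer : List (List Int)) :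
    List (Int × Int) → List (List Int)
  | [] => answer
  | (qx, qy) :: rest =>
    match pvGGet? answer (qx - 1) (qy - 1) with
    | none => solGoB rows columns max_virus answer rest   -- Python raises IndexError here (outside Pre_)
    | some v =>
      if v < max_virus then
        solGoB rows columns max_virus (pvGSet answer (qx - 1) (qy - 1) (v + 1)) rest
      else if v = max_virus then
        solGoB rows columns max_virus
          (pvBumpGrid max_virus
            (sweepFix rows columns max_virus answer [(qx - 1, qy - 1)])
            answer) rest
      else solGoB rows columns max_virus answer rest

def solution_alt (rows : Int) (columns : Int) (max_virus : Int) (queries : List (Int × Int)) : List (List Int) :=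
  solGoB rows columns max_virus
    (List.replicate rows.toNat (List.replicate columns.toNat (0 : Int))) queries

-- ===== PRECONDITION & SPEC =====

-- Pre_ excludes exactly the queries on which Python's `answer[x - 1][y - 1]` raises an
-- IndexError (a coordinate outside the range `1 - rows .. rows` / `1 - columns .. columns`);
-- on every input admitted here A returns normally.
def Pre_solution (rows : Int) (columns : Int) (max_virus : Int) (queries : List (Int × Int)) : Prop :=
  ∀ p ∈ queries, 1 - rows ≤ p.1 ∧ p.1 ≤ rows ∧ 1 - columns ≤ p.2 ∧ p.2 ≤ columns
instance (rows : Int) (columns : Int) (max_virus : Int) (queries : List (Int × Int)) : Decidable (Pre_solution rows columns max_virus queries) := by unfold Pre_solution; infer_instance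

def pvWitness_solution : Int × Int × Int × (List (Int × Int)) := (2, 3, 1, [(1, 1), (1, 1), (1, 2), (2, 3)])

def Spec_solution (rows : Int) (columns : Int) (max_virus : Int) (queries : List (Int × Int)) (out : List (List Int)) : Prop := out = solution_alt rows columns max_virus queries
instance (rows : Int) (columns : Int) (max_virus : Int) (queries : List (Int × Int)) (out : List (List Int)) : Decidable (Spec_solution rows columns max_virus queries out) := by unfold Spec_solution; infer_instance

-- ===== CLAIM (what is proved, stated in full; the proofs are below) =====
def Claim_equal_solution : Prop := ∀ (rows : Int) (columns : Int) (max_virus : Int) (queries : List (Int × Int)), Dom_solution rows columns max_virus queries → Pre_solution rows columns max_virus queries → Spec_solution rows columns max_virus queries (solution rows columns max_virus queries)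

-- ===== LEMMAS AND PROOFS =====

-- in-bounds predicate of the flood fills' guard
abbrev pvInb (R C : Int) (c : Int × Int) : Prop := 0 ≤ c.1 ∧ c.1 < R ∧ 0 ≤ c.2 ∧ c.2 < C

-- the four neighbours of a cell, in the common visiting order of both ports
def pvNbrs (p : Int × Int) : List (Int × Int) :=
  [(p.1 - 1, p.2), (p.1 + 1, p.2), (p.1, p.2 - 1), (p.1, p.2 + 1)]

-- functional view of an Int grid (total read; used only at cells where the grid is defined)
def pvA (g : List (List Int)) (c : Int × Int) : Int := (pvGGet? g c.1 c.2).getD 0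

-- "unvisited" predicate of port A's fresh visited grid
abbrev pvUA (vis : List (List Int)) (c : Int × Int) : Prop := pvGGet? vis c.1 c.2 = some 0

-- rectangular R×C grid
def pvRect {α : Type} (R C : Int) (g : List (List α)) : Prop :=
  g.length = R.toNat ∧ ∀ r ∈ g, r.length = C.toNat

-- cells processed by the flood fill: worklist members, closed under stepping to an
-- in-bounds, unvisited neighbour holding exactly m viruses
inductive pvCl (R C m : Int) (a : (Int × Int) → Int) (U : (Int × Int) → Prop)
    (q : List (Int × Int)) : (Int × Int) → Prop where
  | base (p : Int × Int) : p ∈ q → pvCl R C m a U q p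
  | step (p c : Int × Int) : pvCl R C m a U q p → c ∈ pvNbrs p → pvInb R C c → U c →
      a c = m → pvCl R C m a U q c

-- cells that gain one virus: in bounds, unvisited, below m, adjacent to a processed cell
abbrev pvBump (R C m : Int) (a : (Int × Int) → Int) (U : (Int × Int) → Prop)
    (q : List (Int × Int)) (c : Int × Int) : Prop :=
  pvInb R C c ∧ U c ∧ a c < m ∧ ∃ p, pvCl R C m a U q p ∧ c ∈ pvNbrs p

-- the common final grid of both programs' saturated branch
noncomputable def pvPhi (R C m : Int) (ans : List (List Int)) (U : (Int × Int) → Prop)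
    (q : List (Int × Int)) : List (List Int) :=
  ans.mapIdx (fun i row => row.mapIdx (fun j v =>
    @ite Int (pvBump R C m (pvA ans) U q ((i : Int), (j : Int))) (Classical.propDecidable _)
      (v + 1) v))

-- ---- grid read/write lemmas (nonnegative indices only) ----

theorem pvGGet?_some_of_rect {α : Type} {R C : Int} {g : List (List α)} {c : Int × Int}
    (hR : pvRect R C g) (hc : pvInb R C c) : ∃ x, pvGGet? g c.1 c.2 = some x := by
  obtain ⟨hlen, hrow⟩ := hR
  obtain ⟨h1, h2, h3, h4⟩ := hc
  have hi : c.1.toNat < g.length := by omega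
  unfold pvGGet?
  rw [PySem.List.pyGet?_of_nonneg _ h1]
  rw [List.getElem?_eq_getElem hi]
  have hrl : (g[c.1.toNat]).length = C.toNat := hrow _ (List.getElem_mem hi)
  have hj : c.2.toNat < (g[c.1.toNat]).length := by omega
  rw [Option.bind_some, PySem.List.pyGet?_of_nonneg _ h3, List.getElem?_eq_getElem hj]
  exact ⟨_, rfl⟩

theorem pv_mem_pySetD {α : Type} (xs : List α) (i : Int) (v x : α)
    (h : x ∈ PySem.List.pySetD xs i v) : x ∈ xs ∨ x = v := by
  unfold PySem.List.pySetD PySem.List.pySet? at h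
  cases hk : PySem.List.pyIdx? xs.length i with
  | none => simp [hk] at h; exact Or.inl h
  | some k =>
    simp [hk] at h
    rcases List.mem_or_eq_of_mem_set h with h2 | h2
    · exact Or.inl h2
    · exact Or.inr h2

theorem pvRect_gSet {α : Type} {R C : Int} {g : List (List α)} (i j : Int) (v : α)
    (hR : pvRect R C g) : pvRect R C (pvGSet g i j v) := by
  obtain ⟨hlen, hrow⟩ := hR
  unfold pvGSet
  cases h : PySem.List.pyGet? g i with
  | none => exact ⟨hlen, hrow⟩
  | some r =>
    have hr : r ∈ g := PySem.List.mem_of_pyGet?_eq_some _ h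
    simp only [Option.map_some, Option.getD_some]
    constructor
    · rw [PySem.List.length_pySetD]; exact hlen
    · intro r' hr'
      rcases pv_mem_pySetD _ _ _ _ hr' with h2 | h2
      · exact hrow _ h2
      · subst h2
        rw [PySem.List.length_pySetD]
        exact hrow _ hr

theorem pvGGet?_gSet_self {α : Type} {R C : Int} {g : List (List α)} {c : Int × Int} (v : α)
    (hR : pvRect R C g) (hc : pvInb R C c) :
    pvGGet? (pvGSet g c.1 c.2 v) c.1 c.2 = some v := by
  obtain ⟨hlen, hrow⟩ := hR
  obtain ⟨h1, h2, h3, h4⟩ := hc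
  have hi : c.1.toNat < g.length := by omega
  have hg : PySem.List.pyGet? g c.1 = some (g[c.1.toNat]) := by
    rw [PySem.List.pyGet?_of_nonneg _ h1, List.getElem?_eq_getElem hi]
  have hrl : (g[c.1.toNat]).length = C.toNat := hrow _ (List.getElem_mem hi)
  have hj : c.2.toNat < (g[c.1.toNat]).length := by omega
  unfold pvGSet pvGGet?
  rw [hg]
  simp only [Option.map_some, Option.getD_some]
  rw [PySem.List.pySetD_of_nonneg _ _ h1, PySem.List.pySetD_of_nonneg _ _ h3]
  rw [PySem.List.pyGet?_of_nonneg _ h1]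
  rw [List.getElem?_set_self (by simpa using hi)]
  simp only [Option.bind_some]
  rw [PySem.List.pyGet?_of_nonneg _ h3]
  rw [List.getElem?_set_self (by omega)]

theorem pvGGet?_gSet_ne {α : Type} {g : List (List α)} {c c' : Int × Int} (v : α)
    (h1 : 0 ≤ c.1) (h3 : 0 ≤ c.2) (h1' : 0 ≤ c'.1) (h3' : 0 ≤ c'.2) (hne : c ≠ c') :
    pvGGet? (pvGSet g c.1 c.2 v) c'.1 c'.2 = pvGGet? g c'.1 c'.2 := by
  unfold pvGSet pvGGet?
  rw [PySem.List.pyGet?_of_nonneg _ h1]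
  cases hg : g[c.1.toNat]? with
  | none => rfl
  | some r =>
    have hlt : c.1.toNat < g.length := (List.getElem?_eq_some_iff.mp hg).1
    simp only [Option.map_some, Option.getD_some]
    rw [PySem.List.pySetD_of_nonneg _ _ h1]
    rw [PySem.List.pyGet?_of_nonneg _ h1', PySem.List.pyGet?_of_nonneg _ h1']
    by_cases hii : c.1.toNat = c'.1.toNat
    · have hcc : c.1 = c'.1 := by omega
      have hjj : c.2.toNat ≠ c'.2.toNat := by
        have hj2 : c.2 ≠ c'.2 := by
          intro h
          exact hne (Prod.ext hcc h)
        omega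
      rw [← hii, List.getElem?_set_self hlt, hg]
      simp only [Option.bind_some]
      rw [PySem.List.pySetD_of_nonneg _ _ h3]
      rw [PySem.List.pyGet?_of_nonneg _ h3', PySem.List.pyGet?_of_nonneg _ h3']
      rw [List.getElem?_set_ne hjj]
    · rw [List.getElem?_set_ne hii]

-- ---- derived read/write lemmas at the functional level ----

theorem pvA_gSet_self {R C : Int} {g : List (List Int)} {c : Int × Int} (v : Int)
    (hR : pvRect R C g) (hc : pvInb R C c) : pvA (pvGSet g c.1 c.2 v) c = v := by
  unfold pvA; rw [pvGGet?_gSet_self v hR hc]; rfl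

theorem pvA_gSet_ne {g : List (List Int)} {c c' : Int × Int} (v : Int)
    (h1 : 0 ≤ c.1) (h3 : 0 ≤ c.2) (h1' : 0 ≤ c'.1) (h3' : 0 ≤ c'.2) (hne : c ≠ c') :
    pvA (pvGSet g c.1 c.2 v) c' = pvA g c' := by
  unfold pvA; rw [pvGGet?_gSet_ne v h1 h3 h1' h3' hne]

theorem pvA_eq_of_some {g : List (List Int)} {c : Int × Int} {a : Int}
    (h : pvGGet? g c.1 c.2 = some a) : pvA g c = a := by
  unfold pvA; rw [h]; rfl

-- ---- neighbour-list facts ----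

theorem pvNbrs_nodup (v : Int × Int) : (pvNbrs v).Nodup := by
  simp [pvNbrs, Prod.ext_iff]
  omega

theorem pvNbrs_symm (p c : Int × Int) : c ∈ pvNbrs p ↔ p ∈ pvNbrs c := by
  simp [pvNbrs, Prod.ext_iff]
  omega

-- A's direction arrays produce exactly the neighbour list
def pvNbA (vx vy : Int) (d : Int × Int) : Int × Int := (d.1 + vx, d.2 + vy)

theorem pvMapNbA (vx vy : Int) : (dxA.zip dyA).map (pvNbA vx vy) = pvNbrs (vx, vy) := by
  simp [dxA, dyA, pvNbA, pvNbrs, Prod.ext_iff]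
  omega

-- cell-level form of A's per-direction body
def pvVisA (R C m : Int) (st : List (List Int) × List (List Int) × List (Int × Int))
    (n : Int × Int) : List (List Int) × List (List Int) × List (Int × Int) :=
  if 0 ≤ n.1 ∧ n.1 < R ∧ 0 ≤ n.2 ∧ n.2 < C then
    match pvGGet? st.2.1 n.1 n.2, pvGGet? st.1 n.1 n.2 with
    | some w, some a =>
      if w = 0 ∧ a < m then
        (pvGSet st.1 n.1 n.2 (a + 1), pvGSet st.2.1 n.1 n.2 1, st.2.2)
      else if w = 0 ∧ a = m then
        (st.1, pvGSet st.2.1 n.1 n.2 1, st.2.2 ++ [n])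
      else st
    | _, _ => st
  else st

theorem stepA_eq_fold (R C m : Int) (v : Int × Int) (ans vis : List (List Int)) :
    stepA R C m v ans vis = (pvNbrs v).foldl (pvVisA R C m) (ans, vis, []) := by
  unfold stepA
  rw [show (pvNbrs v) = (dxA.zip dyA).map (pvNbA v.1 v.2) from (pvMapNbA v.1 v.2).symm]
  rw [List.foldl_map]
  rfl

-- ---- characterization of processing the (nodup) neighbour list of one cell: port A ----

theorem pvFoldA_char (R C m : Int) :
    ∀ (ns : List (Int × Int)) (ans vis : List (List Int)) (lst : List (Int × Int)),
    pvRect R C ans → pvRect R C vis → (∀ c, pvInb R C c → pvA ans c ≤ m) → ns.Nodup →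
    pvRect R C (ns.foldl (pvVisA R C m) (ans, vis, lst)).1 ∧
    pvRect R C (ns.foldl (pvVisA R C m) (ans, vis, lst)).2.1 ∧
    (∀ c, pvInb R C c → pvA (ns.foldl (pvVisA R C m) (ans, vis, lst)).1 c =
      if c ∈ ns ∧ pvUA vis c ∧ pvA ans c < m then pvA ans c + 1 else pvA ans c) ∧
    (∀ c, pvInb R C c → (pvUA (ns.foldl (pvVisA R C m) (ans, vis, lst)).2.1 c ↔
      pvUA vis c ∧ c ∉ ns)) ∧
    (∀ c, c ∈ (ns.foldl (pvVisA R C m) (ans, vis, lst)).2.2 ↔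
      c ∈ lst ∨ (c ∈ ns ∧ pvInb R C c ∧ pvUA vis c ∧ pvA ans c = m)) := by
  intro ns
  induction ns with
  | nil =>
    intro ans vis lst hRa hRv hS _
    refine ⟨hRa, hRv, ?_, ?_, ?_⟩ <;> simp
  | cons n t ih =>
    intro ans vis lst hRa hRv hS hnd
    have hnt : n ∉ t := (List.nodup_cons.mp hnd).1
    have hndt : t.Nodup := (List.nodup_cons.mp hnd).2
    simp only [List.foldl_cons]
    by_cases hInb : pvInb R C n
    case neg =>
      -- out of bounds: the guard fails, state unchanged
      have hvis : pvVisA R C m (ans, vis, lst) n = (ans, vis, lst) := by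
        unfold pvVisA
        rw [if_neg (by unfold pvInb at hInb; exact hInb)]
      rw [hvis]
      obtain ⟨i1, i2, i3, i4, i5⟩ := ih ans vis lst hRa hRv hS hndt
      refine ⟨i1, i2, ?_, ?_, ?_⟩
      · intro c hc
        rw [i3 c hc]
        have hcn : c ≠ n := fun h => hInb (h ▸ hc)
        simp [hcn]
      · intro c hc
        rw [i4 c hc]
        have hcn : c ≠ n := fun h => hInb (h ▸ hc)
        simp [hcn]
      · intro c
        rw [i5 c]
        constructor
        · rintro (h | ⟨h1, h2, h3, h4⟩)
          · exact Or.inl h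
          · exact Or.inr ⟨List.mem_cons_of_mem _ h1, h2, h3, h4⟩
        · rintro (h | ⟨h1, h2, h3, h4⟩)
          · exact Or.inl h
          · rcases List.mem_cons.mp h1 with h1 | h1
            · exact absurd (h1 ▸ h2) hInb
            · exact Or.inr ⟨h1, h2, h3, h4⟩
    case pos =>
      obtain ⟨w, hw⟩ := pvGGet?_some_of_rect hRv hInb
      obtain ⟨a, ha⟩ := pvGGet?_some_of_rect hRa hInb
      have hAa : pvA ans n = a := pvA_eq_of_some ha
      have hguard : (0 ≤ n.1 ∧ n.1 < R ∧ 0 ≤ n.2 ∧ n.2 < C) := hInb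
      have ham : a ≤ m := hAa ▸ hS n hInb
      by_cases hw0 : w = 0
      case pos =>
        subst hw0
        have hUAn : pvUA vis n := hw
        by_cases ham' : a < m
        case pos =>
          -- branch: unvisited, below m → mark and increment
          have hvis : pvVisA R C m (ans, vis, lst) n =
              (pvGSet ans n.1 n.2 (a + 1), pvGSet vis n.1 n.2 1, lst) := by
            unfold pvVisA
            rw [if_pos hguard, hw, ha]
            dsimp only
            rw [if_pos ⟨rfl, ham'⟩]
          rw [hvis]
          have hRa1 : pvRect R C (pvGSet ans n.1 n.2 (a + 1)) := pvRect_gSet _ _ _ hRa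
          have hRv1 : pvRect R C (pvGSet vis n.1 n.2 1) := pvRect_gSet _ _ _ hRv
          have hval : ∀ c, pvInb R C c → pvA (pvGSet ans n.1 n.2 (a + 1)) c =
              if c = n then a + 1 else pvA ans c := by
            intro c hc
            by_cases hcn : c = n
            · subst hcn; rw [if_pos rfl]; exact pvA_gSet_self _ hRa hInb
            · rw [if_neg hcn]
              exact pvA_gSet_ne _ hInb.1 hInb.2.2.1 hc.1 hc.2.2.1 (fun h => hcn h.symm)
          have hui : ∀ c, pvInb R C c → (pvUA (pvGSet vis n.1 n.2 1) c ↔ (c ≠ n ∧ pvUA vis c)) := by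
            intro c hc
            unfold pvUA
            by_cases hcn : c = n
            · subst hcn
              rw [pvGGet?_gSet_self _ hRv hInb]
              simp
            · rw [pvGGet?_gSet_ne _ hInb.1 hInb.2.2.1 hc.1 hc.2.2.1 (fun h => hcn h.symm)]
              simp [hcn]
          have hS1 : ∀ c, pvInb R C c → pvA (pvGSet ans n.1 n.2 (a + 1)) c ≤ m := by
            intro c hc
            rw [hval c hc]
            by_cases hcn : c = n
            · rw [if_pos hcn]; omega
            · rw [if_neg hcn]; exact hS c hc
          obtain ⟨i1, i2, i3, i4, i5⟩ := ih _ _ lst hRa1 hRv1 hS1 hndt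
          refine ⟨i1, i2, ?_, ?_, ?_⟩
          · intro c hc
            rw [i3 c hc]
            by_cases hcn : c = n
            · subst hcn
              rw [if_neg (fun h => hnt h.1), hval c hc, if_pos rfl]
              rw [if_pos ⟨List.mem_cons_self, hUAn, by omega⟩, hAa]
            · have hv' : pvA (pvGSet ans n.1 n.2 (a + 1)) c = pvA ans c := by
                rw [hval c hc, if_neg hcn]
              have hcond : (c ∈ t ∧ pvUA (pvGSet vis n.1 n.2 1) c ∧ pvA (pvGSet ans n.1 n.2 (a + 1)) c < m)
                  ↔ (c ∈ n :: t ∧ pvUA vis c ∧ pvA ans c < m) := by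
                rw [hv', hui c hc]
                simp only [List.mem_cons, hcn, false_or]
                tauto
              exact if_congr hcond (by rw [hv']) hv'
          · intro c hc
            rw [i4 c hc]
            by_cases hcn : c = n
            · subst hcn
              rw [hui c hc]
              simp
            · rw [hui c hc]
              simp only [List.mem_cons, not_or, hcn]
              tauto
          · intro c
            rw [i5 c]
            by_cases hc : pvInb R C c
            · by_cases hcn : c = n
              · subst hcn
                constructor
                · rintro (h | ⟨h1, _⟩)
                  · exact Or.inl h
                  · exact absurd h1 hnt
                · rintro (h | ⟨_, _, _, h4⟩)
                  · exact Or.inl h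
                  · rw [hAa] at h4
                    omega
              · have h1 := hui c hc
                have h2 := hval c hc
                rw [if_neg hcn] at h2
                constructor
                · rintro (h | ⟨hm, hib, hu, hv⟩)
                  · exact Or.inl h
                  · exact Or.inr ⟨List.mem_cons_of_mem _ hm, hib, (h1.mp hu).2, by rwa [h2] at hv⟩
                · rintro (h | ⟨hm, hib, hu, hv⟩)
                  · exact Or.inl h
                  · rcases List.mem_cons.mp hm with hm | hm
                    · exact absurd hm hcn
                    · exact Or.inr ⟨hm, hib, h1.mpr ⟨hcn, hu⟩, by rwa [h2]⟩
            · constructor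
              · rintro (h | ⟨_, hib, _⟩)
                · exact Or.inl h
                · exact absurd hib hc
              · rintro (h | ⟨_, hib, _⟩)
                · exact Or.inl h
                · exact absurd hib hc
        case neg =>
          -- branch: unvisited, exactly m → mark and enqueue
          have hameq : a = m := by omega
          have hvis : pvVisA R C m (ans, vis, lst) n =
              (ans, pvGSet vis n.1 n.2 1, lst ++ [n]) := by
            unfold pvVisA
            rw [if_pos hguard, hw, ha]
            dsimp only
            rw [if_neg (fun h => ham' h.2), if_pos ⟨rfl, hameq⟩]
          rw [hvis]
          have hRv1 : pvRect R C (pvGSet vis n.1 n.2 1) := pvRect_gSet _ _ _ hRv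
          have hui : ∀ c, pvInb R C c → (pvUA (pvGSet vis n.1 n.2 1) c ↔ (c ≠ n ∧ pvUA vis c)) := by
            intro c hc
            unfold pvUA
            by_cases hcn : c = n
            · subst hcn
              rw [pvGGet?_gSet_self _ hRv hInb]
              simp
            · rw [pvGGet?_gSet_ne _ hInb.1 hInb.2.2.1 hc.1 hc.2.2.1 (fun h => hcn h.symm)]
              simp [hcn]
          obtain ⟨i1, i2, i3, i4, i5⟩ := ih _ _ (lst ++ [n]) hRa hRv1 hS hndt
          refine ⟨i1, i2, ?_, ?_, ?_⟩
          · intro c hc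
            rw [i3 c hc]
            by_cases hcn : c = n
            · subst hcn
              rw [if_neg (by intro h; exact hnt h.1)]
              rw [if_neg (by intro h; rw [hAa] at h; omega)]
            · have hmem : (c ∈ n :: t) ↔ (c ∈ t) := by simp [hcn]
              by_cases hct : c ∈ t ∧ pvUA vis c ∧ pvA ans c < m
              · rw [if_pos ⟨hct.1, (hui c hc).mpr ⟨hcn, hct.2.1⟩, hct.2.2⟩,
                   if_pos ⟨hmem.mpr hct.1, hct.2.1, hct.2.2⟩]
              · rw [if_neg (by
                    intro hcon
                    exact hct ⟨hcon.1, ((hui c hc).mp hcon.2.1).2, hcon.2.2⟩),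
                  if_neg (by
                    intro hcon
                    exact hct ⟨hmem.mp hcon.1, hcon.2.1, hcon.2.2⟩)]
          · intro c hc
            rw [i4 c hc]
            by_cases hcn : c = n
            · subst hcn
              rw [hui c hc]
              simp
            · rw [hui c hc]
              simp only [List.mem_cons, not_or, hcn]
              tauto
          · intro c
            rw [i5 c]
            simp only [List.mem_append, List.mem_singleton]
            by_cases hc : pvInb R C c
            · by_cases hcn : c = n
              · subst hcn
                constructor
                · rintro ((h | h) | ⟨h1, _⟩)
                  · exact Or.inl h
                  · exact Or.inr ⟨List.mem_cons_self, hInb, hUAn, hAa ▸ hameq⟩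
                  · exact absurd h1 hnt
                · rintro (h | _)
                  · exact Or.inl (Or.inl h)
                  · exact Or.inl (Or.inr rfl)
              · have h1 := hui c hc
                constructor
                · rintro ((h | h) | ⟨hm, hib, hu, hv⟩)
                  · exact Or.inl h
                  · exact absurd h hcn
                  · exact Or.inr ⟨List.mem_cons_of_mem _ hm, hib, (h1.mp hu).2, hv⟩
                · rintro (h | ⟨hm, hib, hu, hv⟩)
                  · exact Or.inl (Or.inl h)
                  · rcases List.mem_cons.mp hm with hm | hm
                    · exact absurd hm hcn
                    · exact Or.inr ⟨hm, hib, h1.mpr ⟨hcn, hu⟩, hv⟩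
            · constructor
              · rintro ((h | h) | ⟨_, hib, _⟩)
                · exact Or.inl h
                · subst h; exact absurd hInb hc
                · exact absurd hib hc
              · rintro (h | ⟨_, hib, _⟩)
                · exact Or.inl (Or.inl h)
                · exact absurd hib hc
      case neg =>
        -- already visited: state unchanged
        have hUAn : ¬ pvUA vis n := by
          unfold pvUA
          rw [hw]
          simp [hw0]
        have hvis : pvVisA R C m (ans, vis, lst) n = (ans, vis, lst) := by
          unfold pvVisA
          rw [if_pos hguard, hw, ha]
          dsimp only
          rw [if_neg (fun h => hw0 h.1), if_neg (fun h => hw0 h.1)]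
        rw [hvis]
        obtain ⟨i1, i2, i3, i4, i5⟩ := ih ans vis lst hRa hRv hS hndt
        refine ⟨i1, i2, ?_, ?_, ?_⟩
        · intro c hc
          rw [i3 c hc]
          by_cases hcn : c = n
          · subst hcn
            rw [if_neg (by tauto), if_neg (by tauto)]
          · have hmem : (c ∈ n :: t) ↔ (c ∈ t) := by simp [hcn]
            by_cases hct : c ∈ t ∧ pvUA vis c ∧ pvA ans c < m
            · rw [if_pos hct, if_pos ⟨hmem.mpr hct.1, hct.2⟩]
            · rw [if_neg hct, if_neg (fun hcon => hct ⟨hmem.mp hcon.1, hcon.2⟩)]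
        · intro c hc
          rw [i4 c hc]
          by_cases hcn : c = n
          · subst hcn
            simp [hUAn]
          · simp [hcn]
        · intro c
          rw [i5 c]
          by_cases hcn : c = n
          · subst hcn
            constructor
            · rintro (h | ⟨h1, _⟩)
              · exact Or.inl h
              · exact absurd h1 hnt
            · rintro (h | ⟨_, _, h3, _⟩)
              · exact Or.inl h
              · exact absurd h3 hUAn
          · constructor
            · rintro (h | ⟨h1, h2⟩)
              · exact Or.inl h
              · exact Or.inr ⟨List.mem_cons_of_mem _ h1, h2⟩
            · rintro (h | ⟨h1, h2⟩)
              · exact Or.inl h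
              · rcases List.mem_cons.mp h1 with hm | hm
                · exact absurd hm hcn
                · exact Or.inr ⟨hm, h2⟩

-- ---- order independence: processing one cell commutes with the rest of the worklist ----

theorem pvCl_nil {R C m : Int} {a : (Int × Int) → Int} {U : (Int × Int) → Prop} {p : Int × Int} :
    ¬ pvCl R C m a U [] p := by
  intro h
  induction h with
  | base p hm => exact absurd hm (List.not_mem_nil)
  | step _ _ _ _ _ _ _ ih => exact ih

theorem pvCl_mono (R C m : Int) (aOld aNew : (Int × Int) → Int) (U U' : (Int × Int) → Prop)
    (v : Int × Int) (q W' : List (Int × Int))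
    (h_mark : ∀ c, pvInb R C c → (U' c ↔ (U c ∧ c ∉ pvNbrs v)))
    (h_val2 : ∀ c, pvInb R C c → ¬ (c ∈ pvNbrs v ∧ U c ∧ aOld c < m) → aNew c = aOld c)
    (h_W : ∀ c, c ∈ W' ↔ (c ∈ q ∨ (c ∈ pvNbrs v ∧ pvInb R C c ∧ U c ∧ aOld c = m))) :
    ∀ p, pvCl R C m aNew U' W' p → pvCl R C m aOld U (v :: q) p := by
  intro p hp
  induction hp with
  | base p hm =>
    rcases (h_W p).mp hm with h | ⟨h1, h2, h3, h4⟩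
    · exact pvCl.base p (List.mem_cons_of_mem _ h)
    · exact pvCl.step v p (pvCl.base v List.mem_cons_self) h1 h2 h3 h4
  | step p0 c hp0 hnb hib hU hval ih =>
    have hU' := (h_mark c hib).mp hU
    have hvc : aNew c = aOld c := h_val2 c hib (fun h => hU'.2 h.1)
    exact pvCl.step p0 c ih hnb hib hU'.1 (hvc ▸ hval)

theorem pvKey (R C m : Int) (aOld aNew : (Int × Int) → Int) (U U' : (Int × Int) → Prop)
    (v : Int × Int) (q W' : List (Int × Int))
    (h_mark : ∀ c, pvInb R C c → (U' c ↔ (U c ∧ c ∉ pvNbrs v)))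
    (h_val2 : ∀ c, pvInb R C c → ¬ (c ∈ pvNbrs v ∧ U c ∧ aOld c < m) → aNew c = aOld c)
    (h_W : ∀ c, c ∈ W' ↔ (c ∈ q ∨ (c ∈ pvNbrs v ∧ pvInb R C c ∧ U c ∧ aOld c = m))) :
    ∀ p, pvCl R C m aOld U (v :: q) p → ∀ c, c ∈ pvNbrs p → pvInb R C c →
      (¬ U' c ∨ ∃ p', pvCl R C m aNew U' W' p' ∧ c ∈ pvNbrs p') := by
  intro p hp
  induction hp with
  | base p hm =>
    rcases List.mem_cons.mp hm with h | h
    · subst h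
      intro c hc hib
      left
      intro hU'
      exact ((h_mark c hib).mp hU').2 hc
    · intro c hc _
      right
      exact ⟨p, pvCl.base p ((h_W p).mpr (Or.inl h)), hc⟩
  | step p0 p hp0 hnb hib hU hval ih =>
    intro c hc hibc
    by_cases hpv : p ∈ pvNbrs v
    · right
      exact ⟨p, pvCl.base p ((h_W p).mpr (Or.inr ⟨hpv, hib, hU, hval⟩)), hc⟩
    · have hU'p : U' p := (h_mark p hib).mpr ⟨hU, hpv⟩
      have havp : aNew p = aOld p := h_val2 p hib (fun h => hpv h.1)
      rcases ih p hnb hib with hcon | ⟨p', hp', hcp'⟩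
      · exact absurd hU'p hcon
      · right
        exact ⟨p, pvCl.step p' p hp' hcp' hib hU'p (havp ▸ hval), hc⟩

theorem pvStepPhi (R C m : Int) (aOld aNew : (Int × Int) → Int) (U U' : (Int × Int) → Prop)
    (v : Int × Int) (q W' : List (Int × Int))
    (h_mark : ∀ c, pvInb R C c → (U' c ↔ (U c ∧ c ∉ pvNbrs v)))
    (h_val1 : ∀ c, pvInb R C c → (c ∈ pvNbrs v ∧ U c ∧ aOld c < m) → aNew c = aOld c + 1)
    (h_val2 : ∀ c, pvInb R C c → ¬ (c ∈ pvNbrs v ∧ U c ∧ aOld c < m) → aNew c = aOld c)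
    (h_W : ∀ c, c ∈ W' ↔ (c ∈ q ∨ (c ∈ pvNbrs v ∧ pvInb R C c ∧ U c ∧ aOld c = m))) :
    ∀ c, pvInb R C c →
      (@ite Int (pvBump R C m aNew U' W' c) (Classical.propDecidable _) (aNew c + 1) (aNew c)) =
      (@ite Int (pvBump R C m aOld U (v :: q) c) (Classical.propDecidable _) (aOld c + 1) (aOld c)) := by
  intro c hib
  by_cases hnb : c ∈ pvNbrs v
  · by_cases hU : U c
    · have hU' : ¬ U' c := fun h => ((h_mark c hib).mp h).2 hnb
      by_cases hlt : aOld c < m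
      · have hval : aNew c = aOld c + 1 := h_val1 c hib ⟨hnb, hU, hlt⟩
        rw [if_neg (fun hb => hU' hb.2.1),
            if_pos ⟨hib, hU, hlt, v, pvCl.base v List.mem_cons_self, hnb⟩, hval]
      · have hval : aNew c = aOld c := h_val2 c hib (fun h => hlt h.2.2)
        rw [if_neg (fun hb => hU' hb.2.1), if_neg (fun hb => hlt hb.2.2.1), hval]
    · have hval : aNew c = aOld c := h_val2 c hib (fun h => hU h.2.1)
      have hU' : ¬ U' c := fun h => hU ((h_mark c hib).mp h).1
      rw [if_neg (fun hb => hU' hb.2.1), if_neg (fun hb => hU hb.2.1), hval]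
  · have hval : aNew c = aOld c := h_val2 c hib (fun h => hnb h.1)
    by_cases hU : U c
    · have hU' : U' c := (h_mark c hib).mpr ⟨hU, hnb⟩
      by_cases hex : ∃ p, pvCl R C m aOld U (v :: q) p ∧ c ∈ pvNbrs p
      · obtain ⟨p, hp, hcp⟩ := hex
        rcases pvKey R C m aOld aNew U U' v q W' h_mark h_val2 h_W p hp c hcp hib with h | hex'
        · exact absurd hU' h
        · by_cases hlt : aOld c < m
          · rw [if_pos ⟨hib, hU', by rw [hval]; exact hlt, hex'⟩,
                if_pos ⟨hib, hU, hlt, p, hp, hcp⟩, hval]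
          · rw [if_neg (fun hb => hlt (by rw [← hval]; exact hb.2.2.1)),
                if_neg (fun hb => hlt hb.2.2.1), hval]
      · have hex2 : ¬ ∃ p', pvCl R C m aNew U' W' p' ∧ c ∈ pvNbrs p' := by
          rintro ⟨p', hp', hcp'⟩
          exact hex ⟨p', pvCl_mono R C m aOld aNew U U' v q W' h_mark h_val2 h_W p' hp', hcp'⟩
        rw [if_neg (fun hb => hex2 hb.2.2.2), if_neg (fun hb => hex hb.2.2.2), hval]
    · have hU' : ¬ U' c := fun h => hU ((h_mark c hib).mp h).1
      rw [if_neg (fun hb => hU' hb.2.1), if_neg (fun hb => hU hb.2.1), hval]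

-- ---- grid-level bookkeeping for the common final grid ----

theorem pvPhi_length (R C m : Int) (ans : List (List Int)) (U : (Int × Int) → Prop)
    (q : List (Int × Int)) : (pvPhi R C m ans U q).length = ans.length := by
  simp [pvPhi]

theorem pvPhi_row_length (R C m : Int) (ans : List (List Int)) (U : (Int × Int) → Prop)
    (q : List (Int × Int)) (i : Nat) (hi : i < ans.length) :
    ((pvPhi R C m ans U q)[i]'(by simpa [pvPhi] using hi)).length = (ans[i]).length := by
  simp [pvPhi]

theorem pvPhi_entry (R C m : Int) (ans : List (List Int)) (U : (Int × Int) → Prop)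
    (q : List (Int × Int)) (i j : Nat) (hi : i < ans.length) (hj : j < (ans[i]).length) :
    ((pvPhi R C m ans U q)[i]'(by simpa [pvPhi] using hi))[j]'(by
        simpa [pvPhi_row_length R C m ans U q i hi] using hj) =
      @ite Int (pvBump R C m (pvA ans) U q ((i : Int), (j : Int))) (Classical.propDecidable _)
        (ans[i][j] + 1) (ans[i][j]) := by
  simp [pvPhi]

theorem pvA_natCast (ans : List (List Int)) (i j : Nat) (hi : i < ans.length)
    (hj : j < (ans[i]).length) : pvA ans ((i : Int), (j : Int)) = ans[i][j] := by
  unfold pvA pvGGet?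
  simp [PySem.List.pyGet?_natCast, List.getElem?_eq_getElem hi, List.getElem?_eq_getElem hj]

theorem pvRect_row {α : Type} {R C : Int} {g : List (List α)} (hR : pvRect R C g)
    (i : Nat) (hi : i < g.length) : (g[i]).length = C.toNat :=
  hR.2 _ (List.getElem_mem hi)

theorem pvGrid_ext {g₁ g₂ : List (List Int)} (hl : g₁.length = g₂.length)
    (hrow : ∀ (i : Nat) (h1 : i < g₁.length) (h2 : i < g₂.length), (g₁[i]).length = (g₂[i]).length)
    (he : ∀ (i j : Nat) (h1 : i < g₁.length) (h2 : i < g₂.length)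
      (hj1 : j < (g₁[i]).length) (hj2 : j < (g₂[i]).length), (g₁[i])[j] = (g₂[i])[j]) :
    g₁ = g₂ := by
  apply List.ext_getElem hl
  intro i h1 h2
  apply List.ext_getElem (hrow i h1 h2)
  intro j hj1 hj2
  exact he i j h1 h2 hj1 hj2

-- ---- main theorem for port A: the BFS loop computes the order-independent grid ----

theorem bfsA_phi (R C m : Int) :
    ∀ (ans vis : List (List Int)) (q : List (Int × Int)),
    pvRect R C ans → pvRect R C vis → (∀ c, pvInb R C c → pvA ans c ≤ m) →
    bfsA R C m ans vis q = pvPhi R C m ans (pvUA vis) q := by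
  intro ans vis q
  induction ans, vis, q using bfsA.induct R C m with
  | case1 ans vis =>
    intro hRa _ _
    rw [bfsA]
    refine pvGrid_ext (by rw [pvPhi_length]) ?_ ?_ |>.symm
    · intro i h1 h2
      rw [pvPhi_row_length R C m ans (pvUA vis) [] i h2]
    · intro i j h1 h2 hj1 hj2
      rw [pvPhi_entry R C m ans (pvUA vis) [] i j h2 hj2]
      rw [if_neg (fun hb => pvCl_nil hb.2.2.2.choose_spec.1)]
  | case2 ans vis v rest ih =>
    intro hRa hRv hS
    obtain ⟨i1, i2, i3, i4, i5⟩ :=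
      pvFoldA_char R C m (pvNbrs v) ans vis [] hRa hRv hS (pvNbrs_nodup v)
    rw [← stepA_eq_fold] at i1 i2 i3 i4 i5
    have hS1 : ∀ c, pvInb R C c → pvA (stepA R C m v ans vis).1 c ≤ m := by
      intro c hc
      rw [i3 c hc]
      by_cases h : c ∈ pvNbrs v ∧ pvUA vis c ∧ pvA ans c < m
      · rw [if_pos h]; omega
      · rw [if_neg h]; exact hS c hc
    rw [bfsA, ih i1 i2 hS1]
    have hlen1 : (stepA R C m v ans vis).1.length = ans.length := by
      rw [i1.1, hRa.1]
    apply pvGrid_ext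
    · rw [pvPhi_length, pvPhi_length, hlen1]
    · intro i h1 h2
      rw [pvPhi_length, hlen1] at h1
      rw [pvPhi_length] at h2
      rw [pvPhi_row_length R C m _ _ _ i (by rwa [hlen1]),
          pvPhi_row_length R C m ans (pvUA vis) (v :: rest) i h2]
      rw [pvRect_row i1 i (by rwa [hlen1]), pvRect_row hRa i h2]
    · intro i j h1 h2 hj1 hj2
      rw [pvPhi_length, hlen1] at h1
      rw [pvPhi_length] at h2
      rw [pvPhi_row_length R C m _ _ _ i (by rwa [hlen1])] at hj1
      rw [pvPhi_row_length R C m ans (pvUA vis) (v :: rest) i h2] at hj2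
      rw [pvPhi_entry R C m _ _ _ i j (by rwa [hlen1]) hj1,
          pvPhi_entry R C m ans (pvUA vis) (v :: rest) i j h2 hj2]
      have hA : ans.length = R.toNat := hRa.1
      have hB : (ans[i]).length = C.toNat := pvRect_row hRa i h2
      have hib : pvInb R C ((i : Int), (j : Int)) := by
        refine ⟨?_, ?_, ?_, ?_⟩
        · show (0 : Int) ≤ (i : Int); omega
        · show (i : Int) < R; omega
        · show (0 : Int) ≤ (j : Int); omega
        · show (j : Int) < C; omega
      rw [← pvA_natCast _ i j (by rwa [hlen1]) hj1, ← pvA_natCast ans i j h2 hj2]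
      refine pvStepPhi R C m (pvA ans) (pvA (stepA R C m v ans vis).1) (pvUA vis)
        (pvUA (stepA R C m v ans vis).2.1) v rest (rest ++ (stepA R C m v ans vis).2.2)
        ?_ ?_ ?_ ?_ _ hib
      · exact i4
      · intro c hc hcond
        rw [i3 c hc, if_pos hcond]
      · intro c hc hcond
        rw [i3 c hc, if_neg hcond]
      · intro c
        rw [List.mem_append, i5 c]
        simp

-- ---- B-side: cells list, adjacency, and the fixed-point region ----

theorem pvMem_cells (R C : Int) (c : Int × Int) : c ∈ pvCells R C ↔ pvInb R C c := by
  unfold pvCells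
  simp only [List.mem_flatMap, List.mem_map, PySem.List.mem_pyRange_one]
  constructor
  · rintro ⟨i, ⟨hi0, hiR⟩, j, ⟨hj0, hjC⟩, rfl⟩
    exact ⟨hi0, hiR, hj0, hjC⟩
  · rintro ⟨h0, h1, h2, h3⟩
    exact ⟨c.1, ⟨h0, h1⟩, c.2, ⟨h2, h3⟩, rfl⟩

theorem pvAdj_iff (reg : List (Int × Int)) (i j : Int) :
    pvAdj reg i j = true ↔ ∃ p ∈ reg, p ∈ pvNbrs (i, j) := by
  have e1 : (i + (-1 : Int), j + (0 : Int)) = (i - 1, j) := Prod.ext (by ring) (by ring)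
  have e2 : (i + (1 : Int), j + (0 : Int)) = (i + 1, j) := Prod.ext (by ring) (by ring)
  have e3 : (i + (0 : Int), j + (-1 : Int)) = (i, j - 1) := Prod.ext (by ring) (by ring)
  have e4 : (i + (0 : Int), j + (1 : Int)) = (i, j + 1) := Prod.ext (by ring) (by ring)
  unfold pvAdj
  simp only [List.any_cons, List.any_nil, Bool.or_eq_true, Bool.or_false,
    List.contains_iff_mem, e1, e2, e3, e4, pvNbrs, List.mem_cons, List.not_mem_nil, or_false]
  constructor
  · rintro (h | h | h | h)
    · exact ⟨_, h, Or.inl rfl⟩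
    · exact ⟨_, h, Or.inr (Or.inl rfl)⟩
    · exact ⟨_, h, Or.inr (Or.inr (Or.inl rfl))⟩
    · exact ⟨_, h, Or.inr (Or.inr (Or.inr rfl))⟩
  · rintro ⟨p, hp, (rfl | rfl | rfl | rfl)⟩
    · exact Or.inl hp
    · exact Or.inr (Or.inl hp)
    · exact Or.inr (Or.inr (Or.inl hp))
    · exact Or.inr (Or.inr (Or.inr hp))

-- flag monotonicity of the sweep fold
theorem pvFoldFlag (m : Int) (ans : List (List Int)) :
    ∀ (l : List (Int × Int)) (st : List (Int × Int) × Bool), st.2 = true →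
      (l.foldl (sweepCell m ans) st).2 = true := by
  intro l
  induction l with
  | nil => intro st h; exact h
  | cons c t ih =>
    intro st h
    simp only [List.foldl_cons]
    apply ih
    unfold sweepCell
    split
    · rfl
    · exact h

-- a sweep whose flag stays false changed nothing and found no candidate
theorem pvFoldFalse (m : Int) (ans : List (List Int)) :
    ∀ (l : List (Int × Int)) (reg : List (Int × Int)),
      (l.foldl (sweepCell m ans) (reg, false)).2 = false →
      (l.foldl (sweepCell m ans) (reg, false)).1 = reg ∧
      ∀ c ∈ l, ¬ (c ∉ reg ∧ pvGGet? ans c.1 c.2 = some m ∧ pvAdj reg c.1 c.2 = true) := by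
  intro l
  induction l with
  | nil => intro reg _; exact ⟨rfl, by simp⟩
  | cons c t ih =>
    intro reg hfl
    simp only [List.foldl_cons] at hfl ⊢
    by_cases hcond : c ∉ reg ∧ pvGGet? ans c.1 c.2 = some m ∧ pvAdj reg c.1 c.2 = true
    · exfalso
      have : sweepCell m ans (reg, false) c = (PySem.Set.add reg c, true) := by
        unfold sweepCell
        rw [if_pos hcond]
      rw [this] at hfl
      rw [pvFoldFlag m ans t _ rfl] at hfl
      simp at hfl
    · have : sweepCell m ans (reg, false) c = (reg, false) := by
        unfold sweepCell
        rw [if_neg hcond]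
      rw [this] at hfl ⊢
      obtain ⟨h1, h2⟩ := ih reg hfl
      refine ⟨h1, ?_⟩
      intro d hd
      rcases List.mem_cons.mp hd with rfl | hd
      · exact hcond
      · exact h2 d hd

-- the sweep fold only adds to the region
theorem pvFoldSub (m : Int) (ans : List (List Int)) :
    ∀ (l : List (Int × Int)) (st : List (Int × Int) × Bool),
      ∀ x ∈ st.1, x ∈ (l.foldl (sweepCell m ans) st).1 := by
  intro l
  induction l with
  | nil => intro st x hx; exact hx
  | cons c t ih =>
    intro st x hx
    simp only [List.foldl_cons]
    apply ih
    unfold sweepCell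
    split
    · exact (PySem.Set.mem_add _ _ _).mpr (Or.inl hx)
    · exact hx

-- soundness: every cell the sweep fold adds lies in the closure
theorem pvFoldSound (R C m : Int) (ans : List (List Int)) (s : Int × Int) :
    ∀ (l : List (Int × Int)) (st : List (Int × Int) × Bool),
      (∀ c ∈ l, c ∈ pvCells R C) →
      (∀ p ∈ st.1, pvCl R C m (pvA ans) (fun _ => True) [s] p) →
      ∀ p ∈ (l.foldl (sweepCell m ans) st).1, pvCl R C m (pvA ans) (fun _ => True) [s] p := by
  intro l
  induction l with
  | nil => intro st _ hs p hp; exact hs p hp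
  | cons c t ih =>
    intro st hl hs
    simp only [List.foldl_cons]
    apply ih _ (fun d hd => hl d (List.mem_cons_of_mem _ hd))
    intro p hp
    unfold sweepCell at hp
    split at hp
    · rename_i hcond
      rcases (PySem.Set.mem_add _ _ _).mp hp with hp | rfl
      · exact hs p hp
      · obtain ⟨hn, hval, hadj⟩ := hcond
        obtain ⟨p0, hp0, hnb⟩ := (pvAdj_iff st.1 p.1 p.2).mp hadj
        have hnb' : p ∈ pvNbrs p0 := (pvNbrs_symm p p0).mp hnb
        exact pvCl.step p0 p (hs p0 hp0) hnb'
          ((pvMem_cells R C p).mp (hl p List.mem_cons_self)) trivial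
          (pvA_eq_of_some hval)
    · exact hs p hp

-- the fixed point contains the start region
theorem pvSweepFix_sub (R C m : Int) (ans : List (List Int)) :
    ∀ (reg : List (Int × Int)), ∀ x ∈ reg, x ∈ sweepFix R C m ans reg := by
  intro reg
  induction reg using sweepFix.induct R C m ans with
  | case1 reg hch ih =>
    intro x hx
    rw [sweepFix, if_pos hch]
    exact ih x (pvFoldSub m ans (pvCells R C) (reg, false) x hx)
  | case2 reg hch =>
    intro x hx
    rw [sweepFix, if_neg hch]
    exact pvFoldSub m ans (pvCells R C) (reg, false) x hx

-- the fixed point is sound: everything in it lies in the closure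
theorem pvSweepFix_sound (R C m : Int) (ans : List (List Int)) (s : Int × Int) :
    ∀ (reg : List (Int × Int)),
      (∀ p ∈ reg, pvCl R C m (pvA ans) (fun _ => True) [s] p) →
      ∀ p ∈ sweepFix R C m ans reg, pvCl R C m (pvA ans) (fun _ => True) [s] p := by
  intro reg
  induction reg using sweepFix.induct R C m ans with
  | case1 reg hch ih =>
    intro hs p hp
    rw [sweepFix, if_pos hch] at hp
    exact ih (pvFoldSound R C m ans s (pvCells R C) (reg, false) (fun c h => h) hs) p hp
  | case2 reg hch =>
    intro hs p hp
    rw [sweepFix, if_neg hch] at hp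
    exact pvFoldSound R C m ans s (pvCells R C) (reg, false) (fun c h => h) hs p hp

-- the fixed point is closed: no in-bounds saturated cell adjacent to it is missing
theorem pvSweepFix_closed (R C m : Int) (ans : List (List Int)) :
    ∀ (reg : List (Int × Int)), ∀ c ∈ pvCells R C,
      ¬ (c ∉ sweepFix R C m ans reg ∧ pvGGet? ans c.1 c.2 = some m ∧
         pvAdj (sweepFix R C m ans reg) c.1 c.2 = true) := by
  intro reg
  induction reg using sweepFix.induct R C m ans with
  | case1 reg hch ih =>
    intro c hc
    rw [sweepFix, if_pos hch]
    exact ih c hc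
  | case2 reg hch =>
    intro c hc
    rw [sweepFix, if_neg hch]
    have hfl : ((pvCells R C).foldl (sweepCell m ans) (reg, false)).2 = false := by
      unfold sweepOnce at hch
      simpa using hch
    obtain ⟨heq, hclosed⟩ := pvFoldFalse m ans (pvCells R C) reg hfl
    unfold sweepOnce
    rw [heq]
    exact hclosed c hc

-- completeness: the closure lies inside the fixed point
theorem pvSweepFix_complete (R C m : Int) (ans : List (List Int)) (s : Int × Int)
    (hR : pvRect R C ans) :
    ∀ p, pvCl R C m (pvA ans) (fun _ => True) [s] p → p ∈ sweepFix R C m ans [s] := by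
  intro p hp
  induction hp with
  | base p hm =>
    rcases List.mem_cons.mp hm with rfl | hm
    · exact pvSweepFix_sub R C m ans [p] p List.mem_cons_self
    · exact absurd hm (List.not_mem_nil)
  | step p0 c hp0 hnb hib _ hval ih =>
    by_cases hc : c ∈ sweepFix R C m ans [s]
    · exact hc
    · exfalso
      obtain ⟨a, ha⟩ := pvGGet?_some_of_rect hR hib
      have haval : pvGGet? ans c.1 c.2 = some m := by
        rw [ha]
        have := pvA_eq_of_some ha
        rw [this] at hval
        rw [hval]
      have hadj : pvAdj (sweepFix R C m ans [s]) c.1 c.2 = true := by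
        rw [pvAdj_iff]
        exact ⟨p0, ih, (pvNbrs_symm p0 c).mp hnb⟩
      exact pvSweepFix_closed R C m ans [s] c ((pvMem_cells R C c).mpr hib) ⟨hc, haval, hadj⟩

-- exact membership of the fixed-point region
theorem pvSweepFix_iff (R C m : Int) (ans : List (List Int)) (s : Int × Int)
    (hR : pvRect R C ans) :
    ∀ p, p ∈ sweepFix R C m ans [s] ↔ pvCl R C m (pvA ans) (fun _ => True) [s] p := by
  intro p
  constructor
  · exact pvSweepFix_sound R C m ans s [s]
      (fun q hq => by
        rcases List.mem_cons.mp hq with rfl | hq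
        · exact pvCl.base q List.mem_cons_self
        · exact absurd hq (List.not_mem_nil)) p
  · exact pvSweepFix_complete R C m ans s hR p

-- ---- the rebuild comprehension equals the common final grid ----

theorem pvBumpGrid_length (m : Int) (reg : List (Int × Int)) (ans : List (List Int)) :
    (pvBumpGrid m reg ans).length = ans.length := by
  simp [pvBumpGrid]

theorem pvBumpGrid_row_length (m : Int) (reg : List (Int × Int)) (ans : List (List Int))
    (i : Nat) (hi : i < ans.length) :
    ((pvBumpGrid m reg ans)[i]'(by simpa [pvBumpGrid] using hi)).length = (ans[i]).length := by
  simp [pvBumpGrid]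

theorem pvBumpGrid_entry (m : Int) (reg : List (Int × Int)) (ans : List (List Int))
    (i j : Nat) (hi : i < ans.length) (hj : j < (ans[i]).length) :
    ((pvBumpGrid m reg ans)[i]'(by simpa [pvBumpGrid] using hi))[j]'(by
        simpa [pvBumpGrid_row_length m reg ans i hi] using hj) =
      if ans[i][j] < m ∧ pvAdj reg (i : Int) (j : Int) = true then ans[i][j] + 1 else ans[i][j] := by
  simp [pvBumpGrid]

theorem pvBumpGrid_eq_phi (R C m : Int) (ans : List (List Int)) (s : Int × Int)
    (hR : pvRect R C ans) :
    pvBumpGrid m (sweepFix R C m ans [s]) ans =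
      pvPhi R C m ans (fun _ => True) [s] := by
  apply pvGrid_ext
  · rw [pvBumpGrid_length, pvPhi_length]
  · intro i h1 h2
    rw [pvBumpGrid_length] at h1
    rw [pvBumpGrid_row_length m _ ans i h1, pvPhi_row_length R C m ans _ [s] i h1]
  · intro i j h1 h2 hj1 hj2
    rw [pvBumpGrid_length] at h1
    rw [pvBumpGrid_row_length m _ ans i h1] at hj1
    rw [pvBumpGrid_entry m _ ans i j h1 hj1, pvPhi_entry R C m ans _ [s] i j h1 hj1]
    have hA : ans.length = R.toNat := hR.1
    have hB : (ans[i]).length = C.toNat := pvRect_row hR i h1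
    have hib : pvInb R C ((i : Int), (j : Int)) := by
      refine ⟨?_, ?_, ?_, ?_⟩
      · show (0 : Int) ≤ (i : Int); omega
      · show (i : Int) < R; omega
      · show (0 : Int) ≤ (j : Int); omega
      · show (j : Int) < C; omega
    have hval : pvA ans ((i : Int), (j : Int)) = ans[i][j] := pvA_natCast ans i j h1 hj1
    have hcond : (ans[i][j] < m ∧ pvAdj (sweepFix R C m ans [s]) (i : Int) (j : Int) = true) ↔
        pvBump R C m (pvA ans) (fun _ => True) [s] ((i : Int), (j : Int)) := by
      constructor
      · rintro ⟨hlt, hadj⟩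
        obtain ⟨p, hp, hnb⟩ := (pvAdj_iff _ _ _).mp hadj
        exact ⟨hib, trivial, by rw [hval]; exact hlt,
          p, (pvSweepFix_iff R C m ans s hR p).mp hp, (pvNbrs_symm p _).mpr hnb⟩
      · rintro ⟨_, _, hlt, p, hp, hnb⟩
        refine ⟨by rw [← hval]; exact hlt, ?_⟩
        rw [pvAdj_iff]
        exact ⟨p, (pvSweepFix_iff R C m ans s hR p).mpr hp, (pvNbrs_symm p _).mp hnb⟩
    by_cases h : pvBump R C m (pvA ans) (fun _ => True) [s] ((i : Int), (j : Int))
    · rw [if_pos (hcond.mpr h), if_pos h]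
    · rw [if_neg (fun hx => h (hcond.mp hx)), if_neg h]

-- ---- negative-index (Python wrap) normalization for the seed access ----

theorem pv_pyIdx?_wrap (n : Nat) (i : Int) (hlo : -(n : Int) ≤ i) (hhi : i < n) :
    PySem.List.pyIdx? n i = some (if i < 0 then (i + n).toNat else i.toNat) := by
  unfold PySem.List.pyIdx?
  by_cases h : 0 ≤ i
  · rw [if_pos h, if_pos hhi, if_neg (by omega)]
  · rw [if_neg h, if_pos (by omega), if_pos (by omega)]
    congr 1
    omega

theorem pv_pyGet?_wrap {α : Type} (xs : List α) (i : Int) (hlo : -(xs.length : Int) ≤ i)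
    (hhi : i < xs.length) :
    PySem.List.pyGet? xs i = xs[(if i < 0 then (i + xs.length).toNat else i.toNat)]? := by
  unfold PySem.List.pyGet?
  rw [pv_pyIdx?_wrap _ _ hlo hhi]
  rfl

theorem pv_pySetD_wrap {α : Type} (xs : List α) (i : Int) (v : α)
    (hlo : -(xs.length : Int) ≤ i) (hhi : i < xs.length) :
    PySem.List.pySetD xs i v = xs.set (if i < 0 then (i + xs.length).toNat else i.toNat) v := by
  unfold PySem.List.pySetD PySem.List.pySet?
  rw [pv_pyIdx?_wrap _ _ hlo hhi]
  rfl

/-- wrapped 2-D access equals access at the normalized in-bounds cell, and so does assignment. -/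
theorem pvWrap {α : Type} {R C : Int} {g : List (List α)} (hR : pvRect R C g)
    (i j : Int) (hi : -R ≤ i ∧ i < R) (hj : -C ≤ j ∧ j < C) :
    pvInb R C ((if i < 0 then i + R else i), (if j < 0 then j + C else j)) ∧
    pvGGet? g i j = pvGGet? g (if i < 0 then i + R else i) (if j < 0 then j + C else j) ∧
    ∀ v, pvGSet g i j v = pvGSet g (if i < 0 then i + R else i) (if j < 0 then j + C else j) v := by
  have hR0 : 0 < R := by omega
  have hC0 : 0 < C := by omega
  have hlen : g.length = R.toNat := hR.1
  have hgl : -(g.length : Int) ≤ i ∧ i < g.length := by omega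
  have hni : (if i < 0 then i + R else i).toNat = (if i < 0 then (i + g.length).toNat else i.toNat) := by
    split <;> omega
  have hInb : pvInb R C ((if i < 0 then i + R else i), (if j < 0 then j + C else j)) := by
    refine ⟨?_, ?_, ?_, ?_⟩ <;> simp only [] <;> split <;> omega
  have hget1 : PySem.List.pyGet? g i = g[(if i < 0 then i + R else i).toNat]? := by
    rw [pv_pyGet?_wrap g i hgl.1 hgl.2, hni]
  have hget1' : PySem.List.pyGet? g (if i < 0 then i + R else i) =
      g[(if i < 0 then i + R else i).toNat]? := by
    rw [PySem.List.pyGet?_of_nonneg _ (by split <;> omega)]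
  have hrowlen : ∀ (r : List α), r ∈ g → (-(r.length : Int) ≤ j ∧ j < r.length) := by
    intro r hr
    have := hR.2 r hr
    omega
  refine ⟨hInb, ?_, ?_⟩
  · unfold pvGGet?
    rw [hget1, hget1']
    cases hrow : g[(if i < 0 then i + R else i).toNat]? with
    | none => rfl
    | some r =>
      have hrm : r ∈ g := List.mem_of_getElem? hrow
      have hjl := hrowlen r hrm
      simp only [Option.bind_some]
      rw [pv_pyGet?_wrap r j hjl.1 hjl.2,
          PySem.List.pyGet?_of_nonneg _ (by split <;> omega)]
      congr 1
      have := hR.2 r hrm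
      split <;> omega
  · intro v
    unfold pvGSet
    rw [hget1, hget1']
    cases hrow : g[(if i < 0 then i + R else i).toNat]? with
    | none => rfl
    | some r =>
      have hrm : r ∈ g := List.mem_of_getElem? hrow
      have hjl := hrowlen r hrm
      simp only [Option.map_some, Option.getD_some]
      rw [pv_pySetD_wrap g i _ hgl.1 hgl.2,
          pv_pySetD_wrap r j v hjl.1 hjl.2,
          PySem.List.pySetD_of_nonneg _ _ (by split <;> omega : (0:Int) ≤ (if i < 0 then i + R else i)),
          PySem.List.pySetD_of_nonneg _ _ (by split <;> omega : (0:Int) ≤ (if j < 0 then j + C else j))]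
      rw [hni]
      congr 2
      have := hR.2 r hrm
      split <;> omega

-- ---- fresh visited/answer grids ----

theorem pvRect_replicate {α : Type} (R C : Int) (x : α) :
    pvRect R C (List.replicate R.toNat (List.replicate C.toNat x)) := by
  constructor
  · simp
  · intro r hr
    rw [List.eq_of_mem_replicate hr]
    simp

theorem pvGGet?_replicate {α : Type} (R C : Int) (x : α) {c : Int × Int} (hc : pvInb R C c) :
    pvGGet? (List.replicate R.toNat (List.replicate C.toNat x)) c.1 c.2 = some x := by
  unfold pvGGet?
  rw [PySem.List.pyGet?_of_nonneg _ hc.1, List.getElem?_replicate, if_pos (by omega)]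
  simp only [Option.bind_some]
  rw [PySem.List.pyGet?_of_nonneg _ hc.2.2.1, List.getElem?_replicate, if_pos (by omega)]

-- ---- congruence for the final grid in the unvisited predicate ----

theorem pvCl_congr {R C m : Int} {a : (Int × Int) → Int} {U₁ U₂ : (Int × Int) → Prop}
    {q : List (Int × Int)} (h : ∀ c, pvInb R C c → (U₁ c ↔ U₂ c)) :
    ∀ p, pvCl R C m a U₁ q p → pvCl R C m a U₂ q p := by
  intro p hp
  induction hp with
  | base p hm => exact pvCl.base p hm
  | step p0 c hp0 hnb hib hU hval ih => exact pvCl.step p0 c ih hnb hib ((h c hib).mp hU) hval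

theorem pvPhi_congr {R C m : Int} {ans : List (List Int)} {U₁ U₂ : (Int × Int) → Prop}
    {q : List (Int × Int)} (hRa : pvRect R C ans) (h : ∀ c, pvInb R C c → (U₁ c ↔ U₂ c)) :
    pvPhi R C m ans U₁ q = pvPhi R C m ans U₂ q := by
  apply pvGrid_ext
  · rw [pvPhi_length, pvPhi_length]
  · intro i h1 h2
    rw [pvPhi_length] at h1 h2
    rw [pvPhi_row_length R C m ans U₁ q i h1, pvPhi_row_length R C m ans U₂ q i h1]
  · intro i j h1 h2 hj1 hj2
    rw [pvPhi_length] at h1 h2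
    rw [pvPhi_row_length R C m ans U₁ q i h1] at hj1
    rw [pvPhi_entry R C m ans U₁ q i j h1 hj1, pvPhi_entry R C m ans U₂ q i j h1 hj1]
    have hA : ans.length = R.toNat := hRa.1
    have hB : (ans[i]).length = C.toNat := pvRect_row hRa i h1
    have hib : pvInb R C ((i : Int), (j : Int)) := by
      refine ⟨?_, ?_, ?_, ?_⟩
      · show (0 : Int) ≤ (i : Int); omega
      · show (i : Int) < R; omega
      · show (0 : Int) ≤ (j : Int); omega
      · show (j : Int) < C; omega
    have hbump : pvBump R C m (pvA ans) U₁ q ((i : Int), (j : Int)) ↔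
        pvBump R C m (pvA ans) U₂ q ((i : Int), (j : Int)) := by
      constructor
      · rintro ⟨hb1, hb2, hb3, p, hp, hnb⟩
        exact ⟨hb1, (h _ hb1).mp hb2, hb3, p, pvCl_congr h p hp, hnb⟩
      · rintro ⟨hb1, hb2, hb3, p, hp, hnb⟩
        exact ⟨hb1, (h _ hb1).mpr hb2, hb3, p, pvCl_congr (fun c hc => (h c hc).symm) p hp, hnb⟩
    exact @if_congr Int _ _ (Classical.propDecidable _) (Classical.propDecidable _) _ _ _ _ hbump rfl rfl

-- ---- the flood fill preserves rectangularity and the value bounds ----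

theorem pvRect_of {α : Type} {R C : Int} {g : List (List α)} (hl : g.length = R.toNat)
    (hr : ∀ (i : Nat) (h : i < g.length), (g[i]).length = C.toNat) : pvRect R C g := by
  refine ⟨hl, ?_⟩
  intro r hrm
  obtain ⟨i, hi, rfl⟩ := List.mem_iff_getElem.mp hrm
  exact hr i hi

theorem pvRect_pvPhi {R C m : Int} {ans : List (List Int)} {U : (Int × Int) → Prop}
    {q : List (Int × Int)} (hRa : pvRect R C ans) : pvRect R C (pvPhi R C m ans U q) := by
  apply pvRect_of
  · rw [pvPhi_length]; exact hRa.1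
  · intro i hi
    rw [pvPhi_length] at hi
    rw [pvPhi_row_length R C m ans U q i hi]
    exact pvRect_row hRa i hi

theorem pvA_pvPhi {R C m : Int} {ans : List (List Int)} {U : (Int × Int) → Prop}
    {q : List (Int × Int)} (hRa : pvRect R C ans) {c : Int × Int} (hc : pvInb R C c) :
    pvA (pvPhi R C m ans U q) c =
      @ite Int (pvBump R C m (pvA ans) U q c) (Classical.propDecidable _)
        (pvA ans c + 1) (pvA ans c) := by
  have hi : c.1.toNat < ans.length := by have := hRa.1; omega
  have hj : c.2.toNat < (ans[c.1.toNat]).length := by have := pvRect_row hRa c.1.toNat hi; omega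
  have hcast : ((c.1.toNat : Int), (c.2.toNat : Int)) = c := Prod.ext (by omega) (by omega)
  have h1 := pvA_natCast (pvPhi R C m ans U q) c.1.toNat c.2.toNat
    (by rw [pvPhi_length]; exact hi) (by rw [pvPhi_row_length R C m ans U q _ hi]; exact hj)
  rw [hcast] at h1
  rw [h1, pvPhi_entry R C m ans U q c.1.toNat c.2.toNat hi hj, hcast]
  have h2 := pvA_natCast ans c.1.toNat c.2.toNat hi hj
  rw [hcast] at h2
  rw [h2]

-- ---- outer loop: per query the two ports transform the grid identically ----

theorem pvGo_eq (R C m : Int) :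
    ∀ (qs : List (Int × Int)) (g : List (List Int)),
    pvRect R C g → (∀ c, pvInb R C c → 0 ≤ pvA g c ∧ pvA g c ≤ max m 0) →
    (∀ p ∈ qs, 1 - R ≤ p.1 ∧ p.1 ≤ R ∧ 1 - C ≤ p.2 ∧ p.2 ≤ C) →
    solGoA R C m g qs = solGoB R C m g qs := by
  intro qs
  induction qs with
  | nil => intro g _ _ _; rfl
  | cons hd rest ih =>
    obtain ⟨qx, qy⟩ := hd
    intro g hR hV hPre
    have hpre1 := hPre (qx, qy) List.mem_cons_self
    have hpre' : ∀ p ∈ rest, 1 - R ≤ p.1 ∧ p.1 ≤ R ∧ 1 - C ≤ p.2 ∧ p.2 ≤ C :=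
      fun p hp => hPre p (List.mem_cons_of_mem _ hp)
    obtain ⟨hInb, hget, hset⟩ := pvWrap hR (qx - 1) (qy - 1)
      (by constructor <;> [omega; omega] ) (by constructor <;> [omega; omega])
    obtain ⟨a, hsome⟩ := pvGGet?_some_of_rect hR hInb
    have hread : pvGGet? g (qx - 1) (qy - 1) = some a := by rw [hget]; exact hsome
    have hAa : pvA g ((if qx - 1 < 0 then qx - 1 + R else qx - 1),
        (if qy - 1 < 0 then qy - 1 + C else qy - 1)) = a := pvA_eq_of_some hsome
    have hbounds := hV _ hInb
    rw [hAa] at hbounds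
    simp only [solGoA, solGoB]
    rw [hread]
    dsimp only
    by_cases h1 : a < m
    · rw [if_pos h1, if_pos h1, hset]
      apply ih _ (pvRect_gSet _ _ _ hR) ?_ hpre'
      intro c hc
      by_cases hcn : c = ((if qx - 1 < 0 then qx - 1 + R else qx - 1),
          (if qy - 1 < 0 then qy - 1 + C else qy - 1))
      · subst hcn
        rw [pvA_gSet_self _ hR hInb]
        omega
      · rw [pvA_gSet_ne _ hInb.1 hInb.2.2.1 hc.1 hc.2.2.1 (fun h => hcn h.symm)]
        exact hV c hc
    · rw [if_neg h1, if_neg h1]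
      by_cases h2 : a = m
      · rw [if_pos h2, if_pos h2]
        have hm0 : 0 ≤ m := by omega
        have hS : ∀ c, pvInb R C c → pvA g c ≤ m := by
          intro c hc
          have := hV c hc
          omega
        rw [bfsA_phi R C m g _ [(qx - 1, qy - 1)] hR (pvRect_replicate R C 0) hS]
        rw [pvBumpGrid_eq_phi R C m g (qx - 1, qy - 1) hR]
        have hcong : pvPhi R C m g (pvUA (List.replicate R.toNat (List.replicate C.toNat (0 : Int))))
            [(qx - 1, qy - 1)] =
            pvPhi R C m g (fun _ => True) [(qx - 1, qy - 1)] := by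
          apply pvPhi_congr hR
          intro c hc
          constructor
          · intro _; trivial
          · intro _; exact pvGGet?_replicate R C 0 hc
        rw [hcong]
        apply ih _ (pvRect_pvPhi hR) ?_ hpre'
        intro c hc
        rw [pvA_pvPhi hR hc]
        have := hV c hc
        by_cases hb : pvBump R C m (pvA g) (fun _ => True) [(qx - 1, qy - 1)] c
        · rw [if_pos hb]
          have := hb.2.2.1
          omega
        · rw [if_neg hb]
          omega
      · rw [if_neg h2, if_neg h2]
        exact ih g hR hV hpre'

-- ===== VERDICT (by name: the statement is the Claim_ definition above) =====
theorem solution_spec : Claim_equal_solution := by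
  intro rows columns max_virus queries _ hPre
  unfold Spec_solution solution solution_alt
  apply pvGo_eq
  · exact pvRect_replicate rows columns 0
  · intro c hc
    rw [pvA_eq_of_some (pvGGet?_replicate rows columns 0 hc)]
    constructor
    · omega
    · omega
  · exact hPre
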